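-- pv_equiv track=rewrite | github.com/peterpepo/AdventOfCode2015 | puzzle_01/puzzle_01.py | count_floors
-- ===== SOURCE A (Python) =====
-- def count_floors(puzzle_input):
--     result_floor = 0
--
--     for instruction in puzzle_input:
--         if instruction == '(':
--             result_floor += 1
--         else:
--             result_floor -= 1
--
--     return result_floor
-- ===== SOURCE B (Python) =====
-- def count_floors(puzzle_input):
--     # Closed form: +1 per '(' and -1 per other char => 2*opens - length.
--     return 2 * puzzle_input.count('(') - len(puzzle_input)
-- ===== Notes on version B (the rewrite author's own statement) =====
-- stated objective: faster
-- what changed: Replaced the character-by-character accumulator loop with an arithmetic closed form over two aggregate quantities: twice the count of opening parentheses minus the string length.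
import Mathlib
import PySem

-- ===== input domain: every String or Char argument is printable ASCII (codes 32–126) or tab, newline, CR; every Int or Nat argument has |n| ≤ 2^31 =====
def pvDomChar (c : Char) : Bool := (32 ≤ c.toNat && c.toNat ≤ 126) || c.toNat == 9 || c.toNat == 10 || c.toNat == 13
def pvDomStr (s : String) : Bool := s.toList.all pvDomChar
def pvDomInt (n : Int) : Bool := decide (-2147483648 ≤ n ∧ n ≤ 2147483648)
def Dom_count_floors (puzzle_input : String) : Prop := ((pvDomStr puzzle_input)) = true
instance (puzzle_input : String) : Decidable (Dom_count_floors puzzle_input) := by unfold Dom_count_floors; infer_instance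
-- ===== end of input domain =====

-- B replaces A's per-character accumulator loop with the closed form 2*count of opens minus length (constant-factor faster in a timing run).

-- ===== PORT A =====
def count_floors (puzzle_input : String) : Int :=
  puzzle_input.toList.foldl
    (fun result_floor instruction =>
      if instruction == '(' then result_floor + 1 else result_floor - 1) 0

-- ===== PORT B =====
def count_floors_alt (puzzle_input : String) : Int :=
  2 * (PySem.Str.count puzzle_input "(" : Int) - PySem.Str.len puzzle_input

-- ===== PRECONDITION & SPEC =====
def Spec_count_floors (puzzle_input : String) (out : Int) : Prop := out = count_floors_alt puzzle_input
instance (puzzle_input : String) (out : Int) : Decidable (Spec_count_floors puzzle_input out) := by unfold Spec_count_floors; infer_instance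

-- ===== CLAIM (what is proved, stated in full; the proofs are below) =====
def Claim_equal_count_floors : Prop := ∀ (puzzle_input : String), Dom_count_floors puzzle_input → Spec_count_floors puzzle_input (count_floors puzzle_input)

-- ===== LEMMAS AND PROOFS =====

-- Chars.count with a single-character needle is List.count.
theorem chars_count_go_single (c : Char) :
    ∀ (l : List Char) (fuel acc : Nat), l.length ≤ fuel →
      PySem.Chars.count.go [c] fuel l acc = acc + l.count c := by
  intro l
  induction l with
  | nil =>
      intro fuel acc _
      cases fuel <;> simp [PySem.Chars.count.go]
  | cons h t ih =>
      intro fuel acc hle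
      cases fuel with
      | zero => simp at hle
      | succ n =>
          simp only [PySem.Chars.count.go]
          by_cases hch : h = c
          · subst hch
            rw [if_pos (by simp [List.isPrefixOf])]
            rw [show List.drop (List.length [h]) (h :: t) = t by simp]
            rw [ih n (acc + 1) (by simpa using hle)]
            simp [List.count_cons]
            omega
          · rw [if_neg (by simp [List.isPrefixOf]; exact fun e => hch e.symm)]
            rw [ih n acc (by simpa using hle)]
            simp [hch]

theorem str_count_single (s : String) :
    PySem.Str.count s "(" = s.toList.count '(' := by
  show PySem.Chars.count s.toList "(".toList = _
  rw [show "(".toList = ['('] from rfl]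
  simp only [PySem.Chars.count, List.isEmpty_cons, Bool.false_eq_true, if_false]
  rw [show s.toList.length = s.length from by simp] at *
  rw [chars_count_go_single '(' s.toList s.length 0 (by simp)]
  simp

theorem foldl_closed (l : List Char) :
    ∀ (acc : Int),
      l.foldl (fun r i => if i == '(' then r + 1 else r - 1) acc
        = acc + 2 * (l.count '(' : Int) - l.length := by
  induction l with
  | nil => intro acc; simp
  | cons h t ih =>
      intro acc
      by_cases hc : h = '('
      · subst hc
        simp only [List.foldl_cons, beq_self_eq_true, if_true, ih,
          List.count_cons, List.length_cons, beq_self_eq_true]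
        push_cast
        ring
      · rw [List.foldl_cons, if_neg (by simpa using hc), ih]
        simp only [List.count_cons, List.length_cons, beq_iff_eq, if_neg hc]
        push_cast
        ring

-- ===== VERDICT (by name: the statement is the Claim_ definition above) =====
theorem count_floors_spec : Claim_equal_count_floors := by
  intro s _
  show count_floors s = count_floors_alt s
  unfold count_floors count_floors_alt
  rw [str_count_single, foldl_closed, PySem.Str.len]
  simp
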